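-- pv_equiv track=rewrite | github.com/jean-flp/IC-features | Features de sequência/Cálculo das Features de Sequência/Emboss.py | sequencias500
-- ===== SOURCE A (Python) =====
-- def sequencias500(seq_dict):
--     emboss_strings = []
--     current_chunk = ""
--     count = 0
--
--     for gene_id, seq in seq_dict.items():
--         current_chunk += f">{gene_id}\n{seq}\n"
--
--         count += 1
--         if count % 500 == 0:
--             emboss_strings.append(current_chunk)
--             current_chunk = ""
--     if current_chunk:
--         emboss_strings.append(current_chunk)
--     return emboss_strings
-- ===== SOURCE B (Python) =====
-- def sequencias500(seq_dict):
--     items = list(seq_dict.items())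
--     emboss_strings = []
--     for i in range(0, len(items), 500):
--         emboss_strings.append(
--             "".join(f">{gene_id}\n{seq}\n" for gene_id, seq in items[i:i + 500]))
--     return emboss_strings
-- ===== Notes on version B (the rewrite author's own statement) =====
-- stated objective: idiomatic
-- what changed: Replaces the modulo counter with a conditional-flush string accumulator by index-based chunking: materialize the items, iterate chunk starts with range(0, len, 500), and join each 500-item slice into its FASTA string.
import Mathlib
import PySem

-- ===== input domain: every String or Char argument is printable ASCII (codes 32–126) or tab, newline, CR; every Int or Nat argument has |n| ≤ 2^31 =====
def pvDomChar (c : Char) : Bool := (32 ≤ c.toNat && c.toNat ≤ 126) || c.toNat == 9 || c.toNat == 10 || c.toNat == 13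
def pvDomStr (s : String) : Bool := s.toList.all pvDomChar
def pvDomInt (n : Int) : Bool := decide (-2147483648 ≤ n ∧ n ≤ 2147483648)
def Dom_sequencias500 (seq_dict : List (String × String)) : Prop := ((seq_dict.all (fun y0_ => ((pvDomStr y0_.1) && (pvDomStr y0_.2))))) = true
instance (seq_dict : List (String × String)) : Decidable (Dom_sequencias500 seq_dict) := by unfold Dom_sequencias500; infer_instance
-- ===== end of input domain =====

-- B groups the dict items into FASTA chunks by index-based slicing (range/slice/join) instead of
-- A's modulo counter with a conditional-flush accumulator; same cost, different decomposition.

-- ===== PORT A =====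
-- loop body of A: append the entry to the current chunk, bump the counter, flush every 500th entry
def stepA (st : List String × String × Int) (p : String × String) : List String × String × Int :=
  let current_chunk := st.2.1 ++ ">" ++ p.1 ++ "\n" ++ p.2 ++ "\n"
  let count := st.2.2 + 1
  if PySem.Int.mod count 500 == 0 then (st.1 ++ [current_chunk], "", count)
  else (st.1, current_chunk, count)

def sequencias500 (seq_dict : List (String × String)) : List String :=
  let st := seq_dict.foldl stepA ([], "", 0)
  if st.2.1 == "" then st.1 else st.1 ++ [st.2.1]

-- ===== PORT B =====
def sequencias500_alt (seq_dict : List (String × String)) : List String :=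
  (PySem.List.pyRange 0 (seq_dict.length) 500).map (fun i =>
    String.join ((PySem.List.slice seq_dict (some i) (some (i + 500))).map
      (fun p => ">" ++ p.1 ++ "\n" ++ p.2 ++ "\n")))

-- ===== PRECONDITION & SPEC =====
def Spec_sequencias500 (seq_dict : List (String × String)) (out : List String) : Prop := out = sequencias500_alt seq_dict
instance (seq_dict : List (String × String)) (out : List String) : Decidable (Spec_sequencias500 seq_dict out) := by unfold Spec_sequencias500; infer_instance

-- ===== CLAIM (what is proved, stated in full; the proofs are below) =====
def Claim_equal_sequencias500 : Prop := ∀ (seq_dict : List (String × String)), Dom_sequencias500 seq_dict → Spec_sequencias500 seq_dict (sequencias500 seq_dict)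

-- ===== LEMMAS AND PROOFS =====

def fmtE (p : String × String) : String := ">" ++ p.1 ++ "\n" ++ p.2 ++ "\n"

def joinFmt : List (String × String) → String
  | [] => ""
  | p :: t => fmtE p ++ joinFmt t

theorem foldl_append_str (l : List String) : ∀ s : String, l.foldl (· ++ ·) s = s ++ l.foldl (· ++ ·) "" := by
  induction l with
  | nil => simp
  | cons a t ih =>
    intro s
    simp only [List.foldl_cons]
    rw [ih (s ++ a), ih ("" ++ a)]
    simp [String.append_assoc]

theorem join_cons (s : String) (t : List String) : String.join (s :: t) = s ++ String.join t := by
  simp only [String.join, List.foldl_cons]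
  rw [foldl_append_str t ("" ++ s)]
  simp

theorem join_map_fmt (l : List (String × String)) :
    String.join (l.map (fun p => ">" ++ p.1 ++ "\n" ++ p.2 ++ "\n")) = joinFmt l := by
  induction l with
  | nil => rfl
  | cons p t ih => rw [List.map_cons, join_cons, ih]; rfl

theorem joinFmt_append (a b : List (String × String)) :
    joinFmt (a ++ b) = joinFmt a ++ joinFmt b := by
  induction a with
  | nil => simp [joinFmt]
  | cons p t ih => simp [joinFmt, ih, String.append_assoc]

theorem joinFmt_ne_empty (l : List (String × String)) (h : l ≠ []) : joinFmt l ≠ "" := by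
  cases l with
  | nil => exact absurd rfl h
  | cons p t =>
    intro he
    have := congrArg String.toList he
    simp [joinFmt, fmtE, String.toList_append] at this

theorem pymod500 (a : Int) : PySem.Int.mod a 500 = a % 500 := by
  simp [PySem.Int.mod, Int.fmod_eq_emod]

-- appended output strings shift out of the fold
theorem stepA_shift (l : List (String × String)) :
    ∀ (em : List String) (ch : String) (c : Int),
    l.foldl stepA (em, ch, c) =
      ((em ++ (l.foldl stepA ([], ch, c)).1, (l.foldl stepA ([], ch, c)).2)) := by
  induction l with
  | nil => intro em ch c; simp
  | cons p t ih =>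
    intro em ch c
    simp only [List.foldl_cons, stepA]
    split
    · rw [ih (em ++ _), ih ([] ++ _)]; simp
    · exact ih em _ _

-- the counter only matters modulo 500
theorem stepA_cshift (l : List (String × String)) :
    ∀ (em : List String) (ch : String) (c : Int),
    l.foldl stepA (em, ch, c + 500) =
      ((l.foldl stepA (em, ch, c)).1, (l.foldl stepA (em, ch, c)).2.1,
       (l.foldl stepA (em, ch, c)).2.2 + 500) := by
  induction l with
  | nil => intro em ch c; simp
  | cons p t ih =>
    intro em ch c
    simp only [List.foldl_cons, stepA]
    have hm : PySem.Int.mod (c + 500 + 1) 500 = PySem.Int.mod (c + 1) 500 := by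
      rw [pymod500, pymod500]; omega
    rw [hm]
    split
    · rw [show c + 500 + 1 = (c + 1) + 500 by ring, ih]
    · rw [show c + 500 + 1 = (c + 1) + 500 by ring, ih]

-- fewer than 500 entries never flush
theorem stepA_noflush (l : List (String × String)) :
    ∀ (em : List String) (ch : String) (c : Int), 0 ≤ c → c + l.length < 500 →
    l.foldl stepA (em, ch, c) = (em, ch ++ joinFmt l, c + l.length) := by
  induction l with
  | nil => intro em ch c _ _; simp [joinFmt]
  | cons p t ih =>
    intro em ch c hc hlt
    simp only [List.foldl_cons, stepA, List.length_cons] at *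
    have hm : ¬ (PySem.Int.mod (c + 1) 500 == 0) = true := by
      rw [pymod500]
      simp only [beq_iff_eq]
      omega
    rw [if_neg hm, ih em _ (c + 1) (by omega) (by omega)]
    simp [joinFmt, fmtE, String.append_assoc]
    omega

-- exactly 500 entries starting from a fresh chunk flush once
theorem stepA_full (l : List (String × String)) (h : l.length = 500) (em : List String) :
    l.foldl stepA (em, "", 0) = (em ++ [joinFmt l], "", 500) := by
  have hne : l ≠ [] := by intro h0; simp [h0] at h
  have hsplit : l = l.dropLast ++ [l.getLast hne] := (List.dropLast_append_getLast hne).symm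
  rw [hsplit, List.foldl_append]
  have hlen : l.dropLast.length = 499 := by simp [h]
  rw [stepA_noflush _ em "" 0 (by norm_num) (by rw [hlen]; norm_num)]
  simp only [List.foldl_cons, List.foldl_nil, stepA, hlen]
  rw [if_pos (by rw [pymod500]; push_cast; decide)]
  simp only [joinFmt_append, Prod.mk.injEq]
  refine ⟨?_, ?_⟩
  · congr 1
    simp [joinFmt, fmtE, String.append_assoc]
  · push_cast
    exact ⟨trivial, by norm_num⟩

-- pyRange with positive step: shift the window
theorem pyRange_pos_shift (a b s : Int) (hs : 0 < s) :
    PySem.List.pyRange (a + s) b s = (PySem.List.pyRange a (b - s) s).map (· + s) := by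
  rw [PySem.List.pyRange_of_pos _ _ hs, PySem.List.pyRange_of_pos _ _ hs, List.map_map]
  rw [show ((b - (a + s) + s - 1) : Int) = (b - s - a + s - 1) by ring]
  simp only [show (a + s < b) ↔ (a < b - s) from by omega]
  apply List.map_congr_left
  intro k _
  simp
  ring

-- pyRange with positive step: peel the first element
theorem pyRange_pos_cons (a b s : Int) (hs : 0 < s) (hab : a < b) :
    PySem.List.pyRange a b s = a :: PySem.List.pyRange (a + s) b s := by
  rw [PySem.List.pyRange_of_pos _ _ hs, PySem.List.pyRange_of_pos _ _ hs, if_pos hab]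
  have h1 : (1 : Int) ≤ (b - a + s - 1) / s := by
    rw [Int.le_ediv_iff_mul_le hs]; omega
  have h0 : (0 : Int) ≤ (b - (a + s) + s - 1) / s := Int.ediv_nonneg (by omega) (by omega)
  have heq : (b - a + s - 1) / s = (b - (a + s) + s - 1) / s + 1 := by
    rw [show ((b - a + s - 1) : Int) = (b - (a + s) + s - 1) + 1 * s by ring,
        Int.add_mul_ediv_right _ _ (by omega)]
  have htn : ((b - a + s - 1) / s).toNat = ((b - (a + s) + s - 1) / s).toNat + 1 := by omega
  rw [htn, List.range_succ_eq_map, List.map_cons, List.map_map]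
  by_cases hab2 : a + s < b
  · rw [if_pos hab2]
    congr 1
    · simp
    · apply List.map_congr_left; intro k _; simp [Nat.succ_eq_add_one]; ring
  · rw [if_neg hab2]
    have h3 : (b - (a + s) + s - 1) / s ≤ 0 := by
      by_contra hpos
      rw [not_le] at hpos
      have := (Int.le_ediv_iff_mul_le hs).mp hpos
      omega
    have h4 : ((b - (a + s) + s - 1) / s).toNat = 0 := by omega
    simp [h4]

-- main equivalence, by induction on a length bound, removing 500 entries at a time
theorem main_aux : ∀ (n : Nat) (l : List (String × String)), l.length ≤ n →
    sequencias500 l = sequencias500_alt l := by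
  intro n
  induction n with
  | zero =>
    intro l hl
    have : l = [] := List.eq_nil_of_length_eq_zero (by omega)
    subst this
    simp [sequencias500, sequencias500_alt, PySem.List.pyRange]
  | succ n ih =>
    intro l hl
    by_cases h0 : l = []
    · subst h0; simp [sequencias500, sequencias500_alt, PySem.List.pyRange]
    · have hpos : 0 < l.length := List.length_pos_of_ne_nil h0
      by_cases hle : l.length ≤ 500
      · -- a single (possibly partial) chunk
        have hB : sequencias500_alt l = [joinFmt l] := by
          unfold sequencias500_alt
          rw [pyRange_pos_cons 0 l.length 500 (by norm_num) (by exact_mod_cast hpos)]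
          have hnil : PySem.List.pyRange (0 + 500) (l.length) 500 = [] := by
            rw [PySem.List.pyRange_of_pos _ _ (by norm_num : (0:Int) < 500)]
            rw [if_neg (by push_cast; omega)]
            simp
          rw [hnil]
          simp only [List.map_cons, List.map_nil]
          rw [show ((0 : Int) + 500) = ((500 : Nat) : Int) by norm_num,
              show (0 : Int) = ((0 : Nat) : Int) by norm_num,
              PySem.List.slice_natCast]
          simp [List.take_of_length_le hle, join_map_fmt]
        rw [hB]
        by_cases hfull : l.length = 500
        · unfold sequencias500
          rw [stepA_full l hfull []]
          simp
        · unfold sequencias500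
          rw [stepA_noflush l [] "" 0 (by norm_num) (by omega)]
          rw [if_neg]
          · simp
          · simp only [beq_iff_eq]
            intro hh
            have := joinFmt_ne_empty l h0
            simp_all
      · -- more than 500 entries: a full chunk, then recurse on the rest
        rw [not_le] at hle
        have hsplit : l = l.take 500 ++ l.drop 500 := (List.take_append_drop 500 l).symm
        have htlen : (l.take 500).length = 500 := by simp; omega
        have hdlen : (l.drop 500).length = l.length - 500 := by simp
        -- A side
        have hA : sequencias500 l = joinFmt (l.take 500) :: sequencias500 (l.drop 500) := by
          unfold sequencias500
          conv_lhs => rw [hsplit]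
          rw [List.foldl_append, stepA_full _ htlen []]
          simp only [List.nil_append]
          rw [show (500 : Int) = 0 + 500 by ring, stepA_cshift]
          rw [stepA_shift _ [joinFmt (l.take 500)]]
          set s := (l.drop 500).foldl stepA ([], "", 0) with hs
          by_cases hc : (s.2.1 == "") = true
          · simp [hc]
          · simp [hc]
        -- B side
        have hB : sequencias500_alt l =
            joinFmt (l.take 500) :: sequencias500_alt (l.drop 500) := by
          unfold sequencias500_alt
          rw [pyRange_pos_cons 0 l.length 500 (by norm_num) (by exact_mod_cast hpos)]
          rw [show ((0 : Int) + 500) = 0 + (500:Int) by ring,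
              pyRange_pos_shift 0 (l.length) 500 (by norm_num)]
          simp only [List.map_cons, List.map_map]
          congr 1
          · rw [show ((0 : Int) + 500) = 500 by norm_num,
                PySem.List.slice_toNat _ (by norm_num) (by norm_num)]
            norm_num
            rw [← List.map_take, join_map_fmt]
            rw [show Int.toNat 500 = 500 from rfl]
          · rw [show ((l.length : Int) - 500) = ((l.drop 500).length : Int) by push_cast [hdlen]; omega]
            apply List.map_congr_left
            intro i hi
            have hi0 : 0 ≤ i := by
              have := (PySem.List.mem_pyRange_iff_of_pos (by norm_num : (0:Int) < 500) i).mp hi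
              omega
            simp only [Function.comp]
            congr 1
            rw [show i + 500 + 500 = (i + 500) + 500 by ring]
            rw [PySem.List.slice_toNat _ (by omega) (by omega),
                PySem.List.slice_toNat _ hi0 (by omega)]
            have h1 : (i + 500).toNat = i.toNat + 500 := by omega
            have h2 : (i + 500 + 500).toNat = i.toNat + 1000 := by omega
            rw [h1, h2, List.drop_drop]
            have e1 : i.toNat + 1000 - (i.toNat + 500) = 500 := by omega
            have e2 : i.toNat + 500 - i.toNat = 500 := by omega
            rw [e1, e2, Nat.add_comm i.toNat 500]
        have hrec : sequencias500 (l.drop 500) = sequencias500_alt (l.drop 500) := by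
          apply ih
          simp only [List.length_drop]
          omega
        rw [hA, hB, hrec]
  
-- ===== VERDICT (by name: the statement is the Claim_ definition above) =====
theorem sequencias500_spec : Claim_equal_sequencias500 := by
  intro l _
  unfold Spec_sequencias500
  exact main_aux l.length l le_rfl
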